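-- pv_equiv track=rewrite | github.com/senthil-1/useless | app_structured.py | generate_rule_based_mood
-- ===== SOURCE A (Python) =====
-- def generate_rule_based_mood(items):
--     mood_lines = []
--     if not items:
--         mood_lines.append("Fridge – \"Empty. Existential dread detected.\"")
--     else:
--         for item in items:
--             if "milk" in item.lower():
--                 mood_lines.append(f"{item} – \"Toxic. Let it go.\"")
--             elif "chocolate" in item.lower():
--                 mood_lines.append(f"{item} – \"Emotional support system detected.\"")
--             elif "lemon" in item.lower():
--                 mood_lines.append(f"{item} – \"Fighting for survival.\"")
--             elif "ketchup" in item.lower():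
--                 mood_lines.append(f"{item} – \"Clings to the past. Hopes you’ll order fries.\"")
--             elif "curd" in item.lower():
--                 mood_lines.append(f"{item} – \"In a committed but confusing relationship.\"")
--             else:
--                 mood_lines.append(f"{item} – \"Just vibing in here.\"")
--     mood_lines.append("Final Mood: Your fridge is in a midlife crisis.")
--     return "\n".join(mood_lines)
-- ===== SOURCE B (Python) =====
-- MOOD_TABLE = [
--     ("milk", "Toxic. Let it go."),
--     ("chocolate", "Emotional support system detected."),
--     ("lemon", "Fighting for survival."),
--     ("ketchup", "Clings to the past. Hopes you\u2019ll order fries."),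
--     ("curd", "In a committed but confusing relationship."),
-- ]
--
-- def generate_rule_based_mood(items):
--     if not items:
--         lines = ["Fridge \u2013 \"Empty. Existential dread detected.\""]
--     else:
--         # start everyone at the default, then sweep the table in reverse
--         # priority order, overwriting matches; the highest-priority keyword
--         # is applied last and therefore wins.
--         lines = [f"{item} \u2013 \"Just vibing in here.\"" for item in items]
--         for kw, msg in reversed(MOOD_TABLE):
--             for i, item in enumerate(items):
--                 if kw in item.lower():
--                     lines[i] = f"{item} \u2013 \"{msg}\""
--     lines.append("Final Mood: Your fridge is in a midlife crisis.")
--     return "\n".join(lines)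
-- ===== Notes on version B (the rewrite author's own statement) =====
-- stated objective: alternative
-- what changed: Inverts the loop nesting: instead of running the if/elif keyword chain once per item, B initialises every line to the default and then sweeps the (keyword, message) table in reverse priority order over the whole list, overwriting matching lines so the highest-priority keyword wins.
import Mathlib
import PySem

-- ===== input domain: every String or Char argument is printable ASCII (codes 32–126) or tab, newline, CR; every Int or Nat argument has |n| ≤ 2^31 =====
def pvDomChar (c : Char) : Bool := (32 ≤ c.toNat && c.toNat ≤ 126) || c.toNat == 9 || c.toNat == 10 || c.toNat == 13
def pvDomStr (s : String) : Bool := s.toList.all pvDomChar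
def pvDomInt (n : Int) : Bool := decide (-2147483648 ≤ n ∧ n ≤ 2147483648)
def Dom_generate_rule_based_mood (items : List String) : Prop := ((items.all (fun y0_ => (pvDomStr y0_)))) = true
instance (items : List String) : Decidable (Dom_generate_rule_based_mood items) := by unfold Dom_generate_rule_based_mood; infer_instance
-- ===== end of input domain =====

-- B inverts the loop nesting: default lines first, then a reverse-priority sweep of the keyword table overwriting matches — an alternative algorithm, same cost.

-- ===== PORT A =====
-- literal transliteration of A: accumulate mood_lines with the if/elif chain per item, then join
def generate_rule_based_mood (items : List String) : String :=
  let mood_lines : List String :=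
    if items = [] then
      ["Fridge – \"Empty. Existential dread detected.\""]
    else
      items.foldl (fun acc item =>
        if PySem.Str.isIn "milk" (PySem.Str.lower item) then
          acc ++ [item ++ " – \"Toxic. Let it go.\""]
        else if PySem.Str.isIn "chocolate" (PySem.Str.lower item) then
          acc ++ [item ++ " – \"Emotional support system detected.\""]
        else if PySem.Str.isIn "lemon" (PySem.Str.lower item) then
          acc ++ [item ++ " – \"Fighting for survival.\""]
        else if PySem.Str.isIn "ketchup" (PySem.Str.lower item) then
          acc ++ [item ++ " – \"Clings to the past. Hopes you’ll order fries.\""]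
        else if PySem.Str.isIn "curd" (PySem.Str.lower item) then
          acc ++ [item ++ " – \"In a committed but confusing relationship.\""]
        else
          acc ++ [item ++ " – \"Just vibing in here.\""]) []
  PySem.Str.join "\n" (mood_lines ++ ["Final Mood: Your fridge is in a midlife crisis."])

-- ===== PORT B =====
def moodTable : List (String × String) :=
  [("milk", "Toxic. Let it go."),
   ("chocolate", "Emotional support system detected."),
   ("lemon", "Fighting for survival."),
   ("ketchup", "Clings to the past. Hopes you’ll order fries."),
   ("curd", "In a committed but confusing relationship.")]

-- transliteration of B: the in-place update lines[i] over 'for i, item in enumerate(items)'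
-- becomes the positional zipWith of the overwrite across items and lines
def generate_rule_based_mood_alt (items : List String) : String :=
  let lines : List String :=
    if items = [] then
      ["Fridge – \"Empty. Existential dread detected.\""]
    else
      moodTable.reverse.foldl
        (fun lines km =>
          List.zipWith (fun item line =>
            if PySem.Str.isIn km.1 (PySem.Str.lower item) then
              item ++ " – \"" ++ km.2 ++ "\""
            else line) items lines)
        (items.map (fun item => item ++ " – \"Just vibing in here.\""))
  PySem.Str.join "\n" (lines ++ ["Final Mood: Your fridge is in a midlife crisis."])

-- ===== PRECONDITION & SPEC =====
def Spec_generate_rule_based_mood (items : List String) (out : String) : Prop := out = generate_rule_based_mood_alt items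
instance (items : List String) (out : String) : Decidable (Spec_generate_rule_based_mood items out) := by unfold Spec_generate_rule_based_mood; infer_instance

-- ===== CLAIM (what is proved, stated in full; the proofs are below) =====
def Claim_equal_generate_rule_based_mood : Prop := ∀ (items : List String), Dom_generate_rule_based_mood items → Spec_generate_rule_based_mood items (generate_rule_based_mood items)

-- ===== LEMMAS AND PROOFS =====

-- per-item line produced by A's chain
def lineA (item : String) : String :=
  if PySem.Str.isIn "milk" (PySem.Str.lower item) then
    item ++ " – \"Toxic. Let it go.\""
  else if PySem.Str.isIn "chocolate" (PySem.Str.lower item) then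
    item ++ " – \"Emotional support system detected.\""
  else if PySem.Str.isIn "lemon" (PySem.Str.lower item) then
    item ++ " – \"Fighting for survival.\""
  else if PySem.Str.isIn "ketchup" (PySem.Str.lower item) then
    item ++ " – \"Clings to the past. Hopes you’ll order fries.\""
  else if PySem.Str.isIn "curd" (PySem.Str.lower item) then
    item ++ " – \"In a committed but confusing relationship.\""
  else
    item ++ " – \"Just vibing in here.\""

lemma foldl_lineA (items : List String) (acc : List String) :
    items.foldl (fun acc item =>
        if PySem.Str.isIn "milk" (PySem.Str.lower item) then
          acc ++ [item ++ " – \"Toxic. Let it go.\""]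
        else if PySem.Str.isIn "chocolate" (PySem.Str.lower item) then
          acc ++ [item ++ " – \"Emotional support system detected.\""]
        else if PySem.Str.isIn "lemon" (PySem.Str.lower item) then
          acc ++ [item ++ " – \"Fighting for survival.\""]
        else if PySem.Str.isIn "ketchup" (PySem.Str.lower item) then
          acc ++ [item ++ " – \"Clings to the past. Hopes you’ll order fries.\""]
        else if PySem.Str.isIn "curd" (PySem.Str.lower item) then
          acc ++ [item ++ " – \"In a committed but confusing relationship.\""]
        else
          acc ++ [item ++ " – \"Just vibing in here.\""]) acc
      = acc ++ items.map lineA := by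
  induction items generalizing acc with
  | nil => simp
  | cons h t ih =>
      simp only [List.foldl_cons, List.map_cons, ih, lineA]
      split_ifs <;> simp

lemma zipWith_map_self {α β : Type} (g : β → String → α → α) (h : β)
    (f : String → α) (items : List String) :
    List.zipWith (fun it l => g h it l) items (items.map f)
      = items.map (fun it => g h it (f it)) := by
  induction items with
  | nil => simp
  | cons a l ih => simp [ih]

-- a fold of positional overwrites over a map-initialised list is the map of the per-item fold
lemma foldl_zipWith_map {α β : Type} (t : List β)
    (g : β → String → α → α) (items : List String) (f : String → α) :
    t.foldl (fun (ls : List α) km => List.zipWith (fun it l => g km it l) items ls) (items.map f)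
      = items.map (fun it => t.foldl (fun l km => g km it l) (f it)) := by
  induction t generalizing f with
  | nil => simp
  | cons h tl ih =>
      simp only [List.foldl_cons, zipWith_map_self, ih]

-- per item: the reverse-priority overwrite fold over the table equals A's chain
lemma overwrite_eq_lineA (item : String) :
    moodTable.reverse.foldl
        (fun l km => if PySem.Str.isIn km.1 (PySem.Str.lower item) then
            item ++ " – \"" ++ km.2 ++ "\"" else l)
        (item ++ " – \"Just vibing in here.\"")
      = lineA item := by
  simp only [moodTable, List.reverse, List.reverseAux, List.foldl_cons, List.foldl_nil, lineA]
  split_ifs <;> simp_all [String.append_assoc]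

-- ===== VERDICT (by name: the statement is the Claim_ definition above) =====
theorem generate_rule_based_mood_spec : Claim_equal_generate_rule_based_mood := by
  intro items _
  unfold Spec_generate_rule_based_mood generate_rule_based_mood generate_rule_based_mood_alt
  by_cases h : items = []
  · simp [h]
  · simp only [h, foldl_lineA, List.nil_append,
      foldl_zipWith_map moodTable.reverse
        (fun km it l => if PySem.Str.isIn km.1 (PySem.Str.lower it) then
            it ++ " – \"" ++ km.2 ++ "\"" else l) items]
    exact congrArg
      (fun L => PySem.Str.join "\n" (L ++ ["Final Mood: Your fridge is in a midlife crisis."]))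
      (List.map_congr_left fun x _ => (overwrite_eq_lineA x).symm)
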